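-- pv_equiv track=rewrite | github.com/Fr4nc3/code-hints | leetcode/sumArray.py | concatenatSum
-- ===== SOURCE A (Python) =====
-- import collections
--
-- def concatenatSum(a):
--     tot = 0
--     dic = collections.defaultdict(int)
--     for i in range(len(a)):
--         _str = str(a[i])
--         n = len(_str)
--         dic[n]+=1
--
--     for i in  range(len(a)):
--         for k,v in dic.items():
--             tot+=a[i]*(v*pow(10,k))
--         tot+=(a[i]*len(a))
--
--     return tot
-- ===== SOURCE B (Python) =====
-- def concatenatSum(a):
--     total = 0
--     s = 0
--     for x in a:
--         total += x
--         s += 10 ** len(str(x))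
--     return total * (s + len(a))
-- ===== Notes on version B (the rewrite author's own statement) =====
-- stated objective: faster
-- what changed: Replaces the frequency dict over digit-lengths and the nested loop (for each element, scan all dict items) by one pass accumulating the element sum and S = sum of 10**len(str(x)), returning total*(S+len(a)) in closed form.
import Mathlib
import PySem

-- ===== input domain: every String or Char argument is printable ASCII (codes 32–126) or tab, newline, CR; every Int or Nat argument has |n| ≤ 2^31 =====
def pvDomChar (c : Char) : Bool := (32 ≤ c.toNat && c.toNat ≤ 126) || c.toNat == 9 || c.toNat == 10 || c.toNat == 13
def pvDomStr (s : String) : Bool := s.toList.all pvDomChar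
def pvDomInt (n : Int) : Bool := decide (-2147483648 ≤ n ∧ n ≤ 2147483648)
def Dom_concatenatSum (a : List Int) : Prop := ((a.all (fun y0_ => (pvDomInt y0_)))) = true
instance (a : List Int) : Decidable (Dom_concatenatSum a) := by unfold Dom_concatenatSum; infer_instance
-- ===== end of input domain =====

-- B replaces A's digit-length frequency dict and nested item-scan loop by a single pass
-- accumulating (total, S = Σ 10^len(str(x))) and the closed form total*(S+len(a)); objective: simpler.


-- ===== PORT A =====
def concatenatSum (a : List Int) : Int :=
  let dic : PySem.Dict Int Int :=
    (PySem.List.pyRange 0 (PySem.List.len a)).foldl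
      (fun d i =>
        let _str := PySem.Int.toStr (PySem.List.pyGetD a i 0)
        let n := PySem.Str.len _str
        d.modify n 0 (· + 1)) PySem.Dict.empty
  (PySem.List.pyRange 0 (PySem.List.len a)).foldl
    (fun tot i =>
      let tot := dic.items.foldl
        (fun tot kv => tot + PySem.List.pyGetD a i 0 * (kv.2 * 10 ^ kv.1.toNat)) tot
      tot + PySem.List.pyGetD a i 0 * PySem.List.len a) 0

-- ===== PORT B =====
def concatenatSum_alt (a : List Int) : Int :=
  let p := a.foldl
    (fun p x => (p.1 + x, p.2 + 10 ^ (PySem.Str.len (PySem.Int.toStr x)).toNat))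
    ((0 : Int), (0 : Int))
  p.1 * (p.2 + PySem.List.len a)

-- ===== PRECONDITION & SPEC =====
def Spec_concatenatSum (a : List Int) (out : Int) : Prop := out = concatenatSum_alt a
instance (a : List Int) (out : Int) : Decidable (Spec_concatenatSum a out) := by unfold Spec_concatenatSum; infer_instance

-- ===== CLAIM (what is proved, stated in full; the proofs are below) =====
def Claim_equal_concatenatSum : Prop := ∀ (a : List Int), Dom_concatenatSum a → Spec_concatenatSum a (concatenatSum a)

-- ===== LEMMAS AND PROOFS =====

-- Σ over a Nodup list of (if k = x then f k else 0) = f x when x is in the list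
theorem pvSum_pick (s : List Int) (f : Int → Int) (x : Int) :
    s.Nodup → x ∈ s → (s.map (fun k => if k = x then f k else 0)).sum = f x := by
  induction s with
  | nil => intro _ hx; cases hx
  | cons y t ih =>
    intro hnd hx
    rcases List.mem_cons.mp hx with h | h
    · subst h
      have hz : ∀ k ∈ t, (if k = x then f k else 0) = 0 := by
        intro k hk
        have hk' : k ≠ x := fun e => (List.nodup_cons.mp hnd).1 (e ▸ hk)
        simp [hk']
      rw [List.map_cons, List.sum_cons, List.map_congr_left hz]
      simp
    · have hy : y ≠ x := fun e => (List.nodup_cons.mp hnd).1 (e ▸ h)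
      simp [if_neg hy, ih (List.nodup_cons.mp hnd).2 h]

-- Σ over a Nodup list s ⊇ L of count_L(k)·f k = Σ_{x ∈ L} f x
theorem pvSum_count (L s : List Int) (f : Int → Int) (hnd : s.Nodup)
    (hsub : ∀ y ∈ L, y ∈ s) :
    (s.map (fun k => (L.count k : Int) * f k)).sum = (L.map f).sum := by
  induction L with
  | nil => simp
  | cons x t ih =>
    have h1 : ∀ k ∈ s, ((x :: t).count k : Int) * f k
        = (t.count k : Int) * f k + (if k = x then f k else 0) := by
      intro k _
      rw [List.count_cons]
      by_cases h : k = x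
      · subst h
        push_cast
        simp only [BEq.rfl, if_pos]
        ring
      · simp [h]
        exact Or.inl (fun e => h e.symm)
    rw [List.map_congr_left h1, PySem.List.sum_map_add_int,
        ih (fun y hy => hsub y (List.mem_cons_of_mem _ hy)),
        pvSum_pick s f x hnd (hsub x (List.mem_cons_self)),
        List.map_cons, List.sum_cons]
    ring

theorem concatenatSum_eq (a : List Int) : concatenatSum a = concatenatSum_alt a := by
  unfold concatenatSum concatenatSum_alt
  have h1 := PySem.List.foldl_pyRange_pyGetD a 0
    (fun d x => PySem.Dict.modify d (PySem.Str.len (PySem.Int.toStr x)) 0 (· + 1))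
    (PySem.Dict.empty : PySem.Dict Int Int) (le_refl 0)
  simp only [PySem.List.len, Int.toNat_zero, List.drop_zero] at h1 ⊢
  simp only [h1]
  set L : List Int := a.map (fun x => PySem.Str.len (PySem.Int.toStr x)) with hL
  have hdic : a.foldl (fun d x => PySem.Dict.modify d (PySem.Str.len (PySem.Int.toStr x)) 0 (· + 1))
      PySem.Dict.empty = PySem.Dict.counter L := by
    rw [PySem.Dict.counter_eq_foldl, hL, List.foldl_map]
  simp only [hdic]
  set S : Int := ((PySem.Dict.counter L).items.map (fun kv => kv.2 * 10 ^ kv.1.toNat)).sum with hS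
  have h2 := PySem.List.foldl_pyRange_pyGetD a 0
    (fun tot x => (PySem.Dict.counter L).items.foldl
        (fun t kv => t + x * (kv.2 * 10 ^ kv.1.toNat)) tot + x * (a.length : Int))
    0 (le_refl 0)
  simp only [PySem.List.len, Int.toNat_zero, List.drop_zero] at h2
  simp only [h2]
  -- each iteration of the outer loop adds x·S + x·n
  have hbody : ∀ (tot x : Int),
      ((PySem.Dict.counter L).items.foldl (fun t kv => t + x * (kv.2 * 10 ^ kv.1.toNat)) tot
        + x * (a.length : Int)) = tot + x * (S + (a.length : Int)) := by
    intro tot x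
    rw [PySem.List.foldl_add (PySem.Dict.counter L).items
          (fun kv => x * (kv.2 * 10 ^ kv.1.toNat)) tot,
        List.sum_map_mul_left (PySem.Dict.counter L).items (fun kv => kv.2 * 10 ^ kv.1.toNat) x,
        ← hS]
    ring
  have houter : a.foldl
      (fun tot x => (PySem.Dict.counter L).items.foldl
          (fun t kv => t + x * (kv.2 * 10 ^ kv.1.toNat)) tot + x * (a.length : Int)) 0
      = a.foldl (fun tot x => tot + x * (S + (a.length : Int))) 0 := by
    apply PySem.List.foldl_congr_mem
    intro acc x _
    exact hbody acc x
  rw [houter]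
  rw [
      PySem.List.foldl_add a (fun x => x * (S + (a.length : Int))) 0,
      List.sum_map_mul_right a (fun x => x) (S + (a.length : Int))]
  -- S = Σ_x 10^len(str(x))
  have hSval : S = (L.map (fun k => 10 ^ k.toNat)).sum := by
    rw [hS, PySem.Dict.items_counter L, List.map_map]
    exact pvSum_count L (PySem.Set.ofList L) (fun k => 10 ^ k.toNat)
      (PySem.Set.nodup_ofList L) (fun y hy => (PySem.Set.mem_ofList L y).mpr hy)
  -- B's paired fold splits into the two sums
  rw [PySem.List.foldl_prod_mk (f := fun p x => p + x)
        (g := fun p x => p + 10 ^ (PySem.Str.len (PySem.Int.toStr x)).toNat),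
      PySem.List.foldl_add a (fun x => x) 0,
      PySem.List.foldl_add a (fun x => 10 ^ (PySem.Str.len (PySem.Int.toStr x)).toNat) 0]
  simp only [List.map_id', zero_add]
  rw [hSval, hL, List.map_map]
  simp only [Function.comp_def]

-- ===== VERDICT (by name: the statement is the Claim_ definition above) =====
theorem concatenatSum_spec : Claim_equal_concatenatSum := by
  intro a _
  exact concatenatSum_eq a
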